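-- pv_equiv track=rewrite | github.com/olaugh/mac-maven-analysis | validate_dawg.py | walk_dawg
-- ===== SOURCE A (Python) =====
-- def walk_dawg(entries, start_idx, remaining_word):
--     """Walk DAWG from start_idx looking for remaining_word."""
--     if not remaining_word:
--         return True  # All letters matched
--
--     if start_idx <= 0 or start_idx >= len(entries):
--         return False
--
--     target = remaining_word[0].lower()
--     idx = start_idx
--
--     # Walk sibling chain
--     while idx < len(entries):
--         entry = entries[idx]
--         letter = chr(entry & 0xFF)
--         is_word = bool(entry & 0x100)
--         is_last = bool(entry & 0x200)
--         child = entry >> 10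
--
--         if letter == target:
--             if len(remaining_word) == 1:
--                 # Last letter - must have WORD flag
--                 return is_word
--             else:
--                 # More letters to go - must have child
--                 if child > 0:
--                     return walk_dawg(entries, child, remaining_word[1:])
--                 else:
--                     return False
--
--         if is_last:
--             break
--         idx += 1
--
--     return False
-- ===== SOURCE B (Python) =====
-- def _find_sibling(entries, idx, target):
--     """Scan the sibling chain from idx; return the matching entry or None."""
--     n = len(entries)
--     while idx < n:
--         entry = entries[idx]
--         if chr(entry & 0xFF) == target:
--             return entry
--         if entry & 0x200:
--             return None
--         idx += 1
--     return None
--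
--
-- def walk_dawg(entries, start_idx, remaining_word):
--     """Walk DAWG from start_idx looking for remaining_word (iterative)."""
--     cur = start_idx
--     n = len(entries)
--     last = len(remaining_word) - 1
--     for i, ch in enumerate(remaining_word):
--         if cur <= 0 or cur >= n:
--             return False
--         entry = _find_sibling(entries, cur, ch.lower())
--         if entry is None:
--             return False
--         if i == last:
--             return bool(entry & 0x100)
--         cur = entry >> 10
--     return True
-- ===== Notes on version B (the rewrite author's own statement) =====
-- stated objective: alternative
-- what changed: Replaced A's per-letter tail recursion by a single iterative loop over word positions with an explicit current-node index, factoring the sibling-chain scan into a helper that returns the matching entry.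
import Mathlib
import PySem

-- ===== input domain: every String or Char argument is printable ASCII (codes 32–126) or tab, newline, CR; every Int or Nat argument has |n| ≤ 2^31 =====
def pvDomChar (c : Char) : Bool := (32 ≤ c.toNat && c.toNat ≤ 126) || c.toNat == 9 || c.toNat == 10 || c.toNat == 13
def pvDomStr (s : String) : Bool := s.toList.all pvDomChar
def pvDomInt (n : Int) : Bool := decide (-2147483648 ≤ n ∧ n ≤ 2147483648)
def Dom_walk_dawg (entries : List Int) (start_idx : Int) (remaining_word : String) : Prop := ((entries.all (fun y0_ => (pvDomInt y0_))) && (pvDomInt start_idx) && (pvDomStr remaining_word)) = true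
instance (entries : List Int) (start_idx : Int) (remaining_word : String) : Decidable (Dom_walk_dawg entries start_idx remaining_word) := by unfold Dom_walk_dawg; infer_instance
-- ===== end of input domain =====

-- B replaces A's per-letter recursion by an explicit indexed loop over the word with a
-- separate sibling-chain search helper (objective: alternative decomposition, same cost).


-- ===== PORT A =====
-- A's inner `while` sibling loop: either return a Bool (.inl) or tail-call on the child (.inr).
-- entry & 0xFF = emod 256; bool(entry & 0x100) = 256 ≤ emod 512; bool(entry & 0x200) = 512 ≤ emod 1024;
-- entry >> 10 = floordiv entry 1024 (all exact for arbitrary Python ints).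
def aChain (entries : List Int) (target : Char) (lastLetter : Bool) (idx : Nat) : Bool ⊕ Int :=
  if h : idx < entries.length then
    let entry := entries[idx]
    let letter := Char.ofNat (entry.emod 256).toNat
    let is_word := decide (256 ≤ entry.emod 512)
    let is_last := decide (512 ≤ entry.emod 1024)
    let child := PySem.Int.floordiv entry 1024
    if letter = target then
      if lastLetter then .inl is_word
      else if 0 < child then .inr child else .inl false
    else if is_last then .inl false
    else aChain entries target lastLetter (idx + 1)
  else .inl false
termination_by entries.length - idx

-- A's outer recursion on the remaining word.
def aWalk (entries : List Int) : List Char → Int → Bool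
  | [], _ => true
  | c :: rest, start_idx =>
    if start_idx ≤ 0 ∨ (entries.length : Int) ≤ start_idx then false
    else
      match aChain entries (PySem.Chars.lowerChar c) rest.isEmpty start_idx.toNat with
      | .inl b => b
      | .inr child => aWalk entries rest child

def walk_dawg (entries : List Int) (start_idx : Int) (remaining_word : String) : Bool :=
  aWalk entries remaining_word.toList start_idx

-- ===== PORT B =====
-- B's helper: scan the sibling chain, return the matching entry (or none).
def bFind (entries : List Int) (idx : Nat) (target : Char) : Option Int :=
  if h : idx < entries.length then
    let entry := entries[idx]
    if Char.ofNat (entry.emod 256).toNat = target then some entry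
    else if 512 ≤ entry.emod 1024 then none
    else bFind entries (idx + 1) target
  else none
termination_by entries.length - idx

-- B's single loop over word positions i with current node cur.
def bLoop (entries : List Int) (w : List Char) (i : Nat) (cur : Int) : Bool :=
  if h : i < w.length then
    if cur ≤ 0 ∨ (entries.length : Int) ≤ cur then false
    else
      match bFind entries cur.toNat (PySem.Chars.lowerChar w[i]) with
      | none => false
      | some entry =>
        if i = w.length - 1 then decide (256 ≤ entry.emod 512)
        else bLoop entries w (i + 1) (PySem.Int.floordiv entry 1024)
  else true
termination_by w.length - i

def walk_dawg_alt (entries : List Int) (start_idx : Int) (remaining_word : String) : Bool :=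
  bLoop entries remaining_word.toList 0 start_idx

-- ===== PRECONDITION & SPEC =====
def Spec_walk_dawg (entries : List Int) (start_idx : Int) (remaining_word : String) (out : Bool) : Prop := out = walk_dawg_alt entries start_idx remaining_word
instance (entries : List Int) (start_idx : Int) (remaining_word : String) (out : Bool) : Decidable (Spec_walk_dawg entries start_idx remaining_word out) := by unfold Spec_walk_dawg; infer_instance

-- ===== CLAIM (what is proved, stated in full; the proofs are below) =====
def Claim_equal_walk_dawg : Prop := ∀ (entries : List Int) (start_idx : Int) (remaining_word : String), Dom_walk_dawg entries start_idx remaining_word → Spec_walk_dawg entries start_idx remaining_word (walk_dawg entries start_idx remaining_word)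

-- ===== LEMMAS AND PROOFS =====

-- A's inner loop outcome, expressed through B's chain search.
theorem aChain_eq_bFind (entries : List Int) (target : Char) (lastLetter : Bool) (idx : Nat) :
    aChain entries target lastLetter idx =
      match bFind entries idx target with
      | none => .inl false
      | some e =>
        if lastLetter then .inl (decide (256 ≤ e.emod 512))
        else if 0 < PySem.Int.floordiv e 1024 then .inr (PySem.Int.floordiv e 1024)
        else .inl false := by
  have key : ∀ (n idx : Nat), entries.length - idx ≤ n →
      aChain entries target lastLetter idx =
        match bFind entries idx target with
        | none => .inl false
        | some e =>
          if lastLetter then .inl (decide (256 ≤ e.emod 512))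
          else if 0 < PySem.Int.floordiv e 1024 then .inr (PySem.Int.floordiv e 1024)
          else .inl false := by
    intro n
    induction n with
    | zero =>
      intro idx hn
      have h : ¬ idx < entries.length := by omega
      rw [aChain, bFind]
      simp [h]
    | succ m ih =>
      intro idx hn
      rw [aChain, bFind]
      by_cases h : idx < entries.length
      · simp only [h, dite_true]
        by_cases hm : Char.ofNat (entries[idx].emod 256).toNat = target
        · simp [hm]
        · simp only [hm, if_false]
          by_cases hl : (512 : Int) ≤ entries[idx].emod 1024
          · simp [hl]
          · simp only [hl, decide_false, Bool.false_eq_true, if_false]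
            exact ih (idx + 1) (by omega)
      · simp [h]
  exact key (entries.length - idx) idx le_rfl

theorem aWalk_eq_bLoop (entries : List Int) (w : List Char) :
    ∀ (rest : List Char) (i : Nat) (cur : Int), w.drop i = rest →
      aWalk entries rest cur = bLoop entries w i cur := by
  intro rest
  induction rest with
  | nil =>
    intro i cur hd
    have hlen : w.length ≤ i := by
      have := congrArg List.length hd
      simp [List.length_drop] at this
      omega
    rw [bLoop]
    simp [aWalk, Nat.not_lt.mpr hlen]
  | cons c rest' ih =>
    intro i cur hd
    have hi : i < w.length := by
      by_contra hge
      have : w.drop i = [] := List.drop_eq_nil_of_le (by omega)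
      simp [this] at hd
    have hc : w[i] = c := by
      have h0 : (w.drop i)[0]'(by simp [hd]) = c := by simp [hd]
      simpa [List.getElem_drop] using h0
    have hrest : w.drop (i + 1) = rest' := by
      have := congrArg List.tail hd
      simpa [List.tail_drop] using this
    rw [bLoop]
    simp only [hi, dite_true, hc]
    by_cases hg : cur ≤ 0 ∨ (entries.length : Int) ≤ cur
    · simp [aWalk, hg]
    · simp only [aWalk, hg, if_false]
      rw [aChain_eq_bFind]
      cases hfind : bFind entries cur.toNat (PySem.Chars.lowerChar c) with
      | none => simp
      | some e =>
        have hlast : rest'.isEmpty = decide (i = w.length - 1) := by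
          rcases rest' with _ | ⟨d, ds⟩
          · have : w.length = i + 1 := by
              have := congrArg List.length hrest
              simp [List.length_drop] at this
              omega
            simp [this]
          · have : i + 1 < w.length := by
              have := congrArg List.length hrest
              simp [List.length_drop] at this
              omega
            simp [List.isEmpty]
            omega
        simp only [hlast]
        by_cases hl : i = w.length - 1
        · simp [hl]
        · simp only [hl, decide_false, if_false, Bool.false_eq_true]
          by_cases hch : 0 < PySem.Int.floordiv e 1024
          · simp only [hch, if_true]
            exact ih (i + 1) _ hrest
          · simp only [hch, if_false]
            have hi1 : i + 1 < w.length := by omega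
            have hle : e / 1024 ≤ 0 := by
              have h10 : PySem.Int.floordiv e 1024 = e / 1024 :=
                PySem.Int.floordiv_eq_ediv_of_pos (by norm_num)
              omega
            rw [bLoop]
            simp [hi1, hle]

-- ===== VERDICT (by name: the statement is the Claim_ definition above) =====
theorem walk_dawg_spec : Claim_equal_walk_dawg := by
  intro entries start_idx w _
  unfold Spec_walk_dawg walk_dawg walk_dawg_alt
  exact aWalk_eq_bLoop entries w.toList w.toList 0 start_idx (by simp)
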